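-- pv_equiv track=rewrite | github.com/cubyto/Fundamentals-computing | matrix/exercices-18.py | draw_matrix
-- ===== SOURCE A (Python) =====
-- def draw_matrix(m, n):
--     matriz = []
--     limit = 0
--     start = n
--     for i in range(m):
--         element_rows = [str(i) for i in range(start, limit, -1)]
--         limit -= 1
--         start -= 1
--         matriz.append(element_rows)
--
--     return matriz
-- ===== SOURCE B (Python) =====
-- def draw_matrix(m, n):
--     # Sliding window: the rows+width-1 needed number strings are computed once
--     # in one flat list; each row is a width-wide slice (window) of that list.
--     rows = max(m, 0)
--     width = max(n, 0)
--     count = rows + width - 1 if rows and width else 0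
--     vals = [str(n - k) for k in range(count)]
--     return [vals[i:i + width] for i in range(rows)]
-- ===== Notes on version B (the rewrite author's own statement) =====
-- stated objective: alternative
-- what changed: Replaces the per-row descending ranges (m*n str() calls with cross-row start/limit accumulators) by one flat list of the m+n-1 needed number strings, each computed once, from which every row is taken as a width-n sliding-window slice.
import Mathlib
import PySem

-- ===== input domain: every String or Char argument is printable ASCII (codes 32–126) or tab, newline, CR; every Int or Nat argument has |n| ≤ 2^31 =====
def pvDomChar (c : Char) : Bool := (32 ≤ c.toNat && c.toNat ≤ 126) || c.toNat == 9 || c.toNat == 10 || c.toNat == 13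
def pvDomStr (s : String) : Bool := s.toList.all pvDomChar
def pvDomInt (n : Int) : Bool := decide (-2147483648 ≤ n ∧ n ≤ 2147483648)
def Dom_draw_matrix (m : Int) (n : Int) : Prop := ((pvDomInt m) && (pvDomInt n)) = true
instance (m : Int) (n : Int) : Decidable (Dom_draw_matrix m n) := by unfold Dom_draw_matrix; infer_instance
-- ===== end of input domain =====

-- B computes each number string once in one flat list and takes every row as a
-- width-n sliding-window slice of it, instead of A's per-row descending ranges
-- with cross-row start/limit accumulators; objective: alternative.

-- ===== PORT A =====
-- for i in range(m): element_rows = [str(i) for i in range(start, limit, -1)]; limit -= 1; start -= 1; append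
def draw_matrix (m : Int) (n : Int) : List (List String) :=
  let s := (PySem.List.pyRange 0 m 1).foldl
    (fun (st : List (List String) × Int × Int) _i =>
      let element_rows := (PySem.List.pyRange st.2.2 st.2.1 (-1)).map PySem.Int.toStr
      (st.1 ++ [element_rows], st.2.1 - 1, st.2.2 - 1))
    ([], 0, n)
  s.1

-- ===== PORT B =====
-- rows = max(m,0); width = max(n,0); count = rows+width-1 if rows and width else 0;
-- vals = [str(n - k) for k in range(count)]; [vals[i:i+width] for i in range(rows)]
def draw_matrix_alt (m : Int) (n : Int) : List (List String) :=
  let rows := max m 0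
  let width := max n 0
  let count := if rows ≠ 0 ∧ width ≠ 0 then rows + width - 1 else 0
  let vals := (PySem.List.pyRange 0 count 1).map (fun k => PySem.Int.toStr (n - k))
  (PySem.List.pyRange 0 rows 1).map (fun i => PySem.List.slice vals (some i) (some (i + width)))

-- ===== PRECONDITION & SPEC =====
def Spec_draw_matrix (m : Int) (n : Int) (out : List (List String)) : Prop := out = draw_matrix_alt m n
instance (m : Int) (n : Int) (out : List (List String)) : Decidable (Spec_draw_matrix m n out) := by unfold Spec_draw_matrix; infer_instance

-- ===== CLAIM (what is proved, stated in full; the proofs are below) =====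
def Claim_equal_draw_matrix : Prop := ∀ (m : Int) (n : Int), Dom_draw_matrix m n → Spec_draw_matrix m n (draw_matrix m n)

-- ===== LEMMAS AND PROOFS =====

-- canonical row i, by index arithmetic
def pvRowB (n i : Int) : List String :=
  (PySem.List.pyRange 0 n 1).map (fun j => PySem.Int.toStr (n - i - j))

-- A's descending range for row i equals the canonical row
theorem pvRowA_eq_rowB (n i : Int) :
    (PySem.List.pyRange (n - i) (-i) (-1)).map PySem.Int.toStr = pvRowB n i := by
  unfold pvRowB
  rw [PySem.List.pyRange_neg_one, PySem.List.pyRange_one]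
  simp only [List.map_map, Function.comp_def, Int.sub_zero, zero_add]
  have h : n - i - -i = n := by ring
  rw [h]

-- A-loop invariant: after consuming L with state (acc, -i, n-i), the result appends rows i, i+1, …
theorem pvLoop_eq (n : Int) : ∀ (L : List Int) (acc : List (List String)) (i : Int),
    (L.foldl
      (fun (st : List (List String) × Int × Int) _i =>
        let element_rows := (PySem.List.pyRange st.2.2 st.2.1 (-1)).map PySem.Int.toStr
        (st.1 ++ [element_rows], st.2.1 - 1, st.2.2 - 1))
      (acc, -i, n - i)).1
    = acc ++ (List.range L.length).map (fun t => pvRowB n (i + Int.ofNat t)) := by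
  intro L
  induction L with
  | nil => intro acc i; simp
  | cons hd tl ih =>
    intro acc i
    simp only [List.foldl_cons]
    have h1 : -i - 1 = -(i + 1) := by ring
    have h2 : n - i - 1 = n - (i + 1) := by ring
    rw [pvRowA_eq_rowB, h1, h2, ih (acc ++ [pvRowB n i]) (i + 1)]
    rw [List.length_cons, List.range_succ_eq_map, List.map_cons, List.map_map,
        List.append_assoc, List.singleton_append]
    congr 1
    congr 1
    · norm_num
    · apply List.map_congr_left
      intro t _
      simp only [Function.comp_apply]
      simp only [Int.ofNat_eq_natCast, Nat.cast_succ]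
      congr 1
      ring

-- A equals the canonical form
theorem pvA_eq_canon (m n : Int) :
    draw_matrix m n = (PySem.List.pyRange 0 m 1).map (pvRowB n) := by
  unfold draw_matrix
  rw [show (([], (0:Int), n) : List (List String) × Int × Int) = ([], -0, n - 0) from by norm_num]
  rw [pvLoop_eq n (PySem.List.pyRange 0 m 1) [] 0]
  rw [PySem.List.length_pyRange_one, PySem.List.pyRange_one 0 m, List.map_map]
  simp only [List.nil_append, Int.sub_zero, Function.comp_def, zero_add, pvRowB,
    Int.ofNat_eq_natCast]

-- B's window for row i equals the canonical row, for 0 ≤ i < max m 0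
theorem pvRowB_window (m n i : Int) (h0 : 0 ≤ i) (hm : i < max m 0) :
    PySem.List.slice
      ((PySem.List.pyRange 0
          (if max m 0 ≠ 0 ∧ max n 0 ≠ 0 then max m 0 + max n 0 - 1 else 0) 1).map
        (fun k => PySem.Int.toStr (n - k)))
      (some i) (some (i + max n 0)) = pvRowB n i := by
  have hw : (0:Int) ≤ max n 0 := le_max_right _ _
  rw [PySem.List.slice_toNat _ h0 (by omega)]
  rw [PySem.List.pyRange_one]
  unfold pvRowB
  rw [PySem.List.pyRange_one]
  apply List.ext_getElem
  · simp only [List.length_take, List.length_drop, List.length_map, List.length_range]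
    split_ifs with hc <;> omega
  · intro k h1 h2
    simp only [List.getElem_take, List.getElem_drop, List.getElem_map, List.getElem_range]
    congr 1
    simp only [List.length_take, List.length_drop, List.length_map, List.length_range] at h1
    split_ifs at h1 with hc <;> omega

-- ===== VERDICT (by name: the statement is the Claim_ definition above) =====
theorem draw_matrix_spec : Claim_equal_draw_matrix := by
  intro m n _
  show draw_matrix m n = draw_matrix_alt m n
  rw [pvA_eq_canon]
  show _ = (PySem.List.pyRange 0 (max m 0) 1).map
      (fun i => PySem.List.slice
        ((PySem.List.pyRange 0
            (if max m 0 ≠ 0 ∧ max n 0 ≠ 0 then max m 0 + max n 0 - 1 else 0) 1).map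
          (fun k => PySem.Int.toStr (n - k)))
        (some i) (some (i + max n 0)))
  rw [show PySem.List.pyRange 0 (max m 0) 1 = PySem.List.pyRange 0 m 1 from by
    rw [PySem.List.pyRange_one, PySem.List.pyRange_one]
    congr 2
    omega]
  symm
  apply List.map_congr_left
  intro i hi
  rw [PySem.List.mem_pyRange_one] at hi
  exact pvRowB_window m n i hi.1 (lt_of_lt_of_le hi.2 (le_max_left _ _))
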